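-- pv_equiv track=rewrite | github.com/nilabja9/legend-cli | legend_cli/prompts/enum_templates.py | _is_reference_table_name
-- ===== SOURCE A (Python) =====
-- def _is_reference_table_name(table_name: str) -> bool:
--     """Check if table name suggests a reference/lookup table."""
--     suffixes = (
--         "_TYPE", "_STATUS", "_CODE", "_CATEGORY", "_LOOKUP",
--         "_REF", "_REFERENCE", "_CODES", "_TYPES", "_ENUM",
--         "_LIST", "_VALUES", "_OPTIONS", "_MASTER"
--     )
--     name_upper = table_name.upper()
--     return any(name_upper.endswith(suffix) for suffix in suffixes)
-- ===== SOURCE B (Python) =====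
-- _SUFFIX_WORDS = frozenset({
--     "TYPE", "STATUS", "CODE", "CATEGORY", "LOOKUP",
--     "REF", "REFERENCE", "CODES", "TYPES", "ENUM",
--     "LIST", "VALUES", "OPTIONS", "MASTER",
-- })
--
--
-- def _is_reference_table_name(table_name: str) -> bool:
--     """Check if table name suggests a reference/lookup table."""
--     _head, sep, tail = table_name.upper().rpartition("_")
--     return sep == "_" and tail in _SUFFIX_WORDS
-- ===== Notes on version B (the rewrite author's own statement) =====
-- stated objective: idiomatic
-- what changed: B extracts the last underscore-delimited token once with rpartition and tests frozenset membership, instead of A's any()-scan calling endswith for each of the 14 suffixes.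
import Mathlib
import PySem

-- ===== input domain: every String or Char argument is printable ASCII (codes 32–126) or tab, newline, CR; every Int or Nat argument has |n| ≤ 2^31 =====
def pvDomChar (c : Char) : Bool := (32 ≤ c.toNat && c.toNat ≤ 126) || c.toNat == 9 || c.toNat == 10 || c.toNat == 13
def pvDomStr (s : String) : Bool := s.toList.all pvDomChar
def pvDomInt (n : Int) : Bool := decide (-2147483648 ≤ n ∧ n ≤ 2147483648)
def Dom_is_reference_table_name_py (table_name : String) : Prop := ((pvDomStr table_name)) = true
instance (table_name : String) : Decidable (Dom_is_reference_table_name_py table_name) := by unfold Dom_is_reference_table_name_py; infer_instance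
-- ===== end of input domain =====

-- B replaces A's any()-over-endswith scan of 14 underscore-prefixed suffixes by one
-- rpartition on '_' plus membership of the last token in the set of 14 words (idiomatic).

-- ===== PORT A =====
def pvSuffixes : List String :=
  ["_TYPE", "_STATUS", "_CODE", "_CATEGORY", "_LOOKUP",
   "_REF", "_REFERENCE", "_CODES", "_TYPES", "_ENUM",
   "_LIST", "_VALUES", "_OPTIONS", "_MASTER"]

def is_reference_table_name_py (table_name : String) : Bool :=
  let name_upper := PySem.Str.upper table_name
  pvSuffixes.any (fun suffix => PySem.Str.endswith name_upper suffix)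

-- ===== PORT B =====
-- the 14 suffix words without the leading underscore (Source B's frozenset), as char lists
def pvSuffixWords : List (List Char) :=
  ["TYPE".toList, "STATUS".toList, "CODE".toList, "CATEGORY".toList, "LOOKUP".toList,
   "REF".toList, "REFERENCE".toList, "CODES".toList, "TYPES".toList, "ENUM".toList,
   "LIST".toList, "VALUES".toList, "OPTIONS".toList, "MASTER".toList]

-- rpartition('_') ported by hand (exact): scan the reversed char list up to the last '_';
-- empty dropWhile ⟺ Python's sep == '' (no underscore present)
def is_reference_table_name_py_alt (table_name : String) : Bool :=
  let r := (PySem.Str.upper table_name).toList.reverse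
  match r.dropWhile (fun c => c != '_') with
  | [] => false                                   -- sep == '' : no underscore
  | _ :: _ => pvSuffixWords.contains ((r.takeWhile (fun c => c != '_')).reverse)

-- ===== PRECONDITION & SPEC =====
def Spec_is_reference_table_name_py (table_name : String) (out : Bool) : Prop := out = is_reference_table_name_py_alt table_name
instance (table_name : String) (out : Bool) : Decidable (Spec_is_reference_table_name_py table_name out) := by unfold Spec_is_reference_table_name_py; infer_instance

-- ===== CLAIM (what is proved, stated in full; the proofs are below) =====
def Claim_equal_is_reference_table_name_py : Prop := ∀ (table_name : String), Dom_is_reference_table_name_py table_name → Spec_is_reference_table_name_py table_name (is_reference_table_name_py table_name)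

-- ===== LEMMAS AND PROOFS =====

-- takeWhile/dropWhile of v ++ '_'::rest when v has no underscore
theorem pv_tw_dw (v rest : List Char) (h : '_' ∉ v) :
    (v ++ '_' :: rest).takeWhile (fun c => c != '_') = v ∧
    (v ++ '_' :: rest).dropWhile (fun c => c != '_') = '_' :: rest := by
  induction v with
  | nil => simp
  | cons a v ih =>
    have ha : a ≠ '_' := fun hh => h (hh ▸ List.mem_cons_self)
    have := ih (fun hm => h (List.mem_cons_of_mem a hm))
    simp [ha, this.1, this.2]

-- shape of dropWhile (· != '_'): empty, or starts with '_'
theorem pv_dw_shape (r : List Char) :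
    r.dropWhile (fun c => c != '_') = [] ∨
    ∃ l, r.dropWhile (fun c => c != '_') = '_' :: l := by
  induction r with
  | nil => left; rfl
  | cons a r ih =>
    by_cases ha : a = '_'
    · right; exact ⟨r, by simp [List.dropWhile, ha]⟩
    · have he : (a :: r).dropWhile (fun c => c != '_') = r.dropWhile (fun c => c != '_') := by
        simp [ha]
      rw [he]; exact ih

-- characterisation of endswith ('_'::w) via the last underscore-delimited token
theorem pv_endswith_under (u w : List Char) (h : '_' ∉ w) :
    PySem.Chars.endswith u ('_' :: w) = true ↔
    (u.reverse.dropWhile (fun c => c != '_') ≠ [] ∧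
     (u.reverse.takeWhile (fun c => c != '_')).reverse = w) := by
  rw [PySem.Chars.endswith_iff]
  have hrev : ('_' :: w) <:+ u ↔ (w.reverse ++ ['_']) <+: u.reverse := by
    rw [← List.reverse_prefix]; simp
  rw [hrev]
  have hv : '_' ∉ w.reverse := by simpa using h
  constructor
  · rintro ⟨rest, hrest⟩
    have hr : u.reverse = w.reverse ++ '_' :: rest := by
      rw [← hrest]; simp
    have := pv_tw_dw w.reverse rest hv
    rw [hr, this.1, this.2]
    exact ⟨by simp, by simp⟩
  · rintro ⟨hne, htw⟩
    rcases pv_dw_shape u.reverse with hdw | ⟨l, hdw⟩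
    · exact absurd hdw hne
    · have hsplit : u.reverse = u.reverse.takeWhile (fun c => c != '_') ++
          u.reverse.dropWhile (fun c => c != '_') :=
        (List.takeWhile_append_dropWhile).symm
      have htw' : u.reverse.takeWhile (fun c => c != '_') = w.reverse := by
        rw [← htw]; simp
      exact ⟨l, by rw [hsplit, htw', hdw]; simp⟩

-- the generic form of the claim over any '_'-free word list
theorem pv_gen (u : List Char) (W : List (List Char)) (hW : ∀ w ∈ W, '_' ∉ w) :
    (W.any (fun w => PySem.Chars.endswith u ('_' :: w))) =
    (match u.reverse.dropWhile (fun c => c != '_') with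
     | [] => false
     | _ :: _ => W.contains ((u.reverse.takeWhile (fun c => c != '_')).reverse)) := by
  rcases hsh : u.reverse.dropWhile (fun c => c != '_') with _ | ⟨a, l⟩
  · simp only [List.any_eq_false]
    intro w hw hend
    exact ((pv_endswith_under u w (hW w hw)).1 hend).1 hsh
  · rw [Bool.eq_iff_iff]
    simp only [List.any_eq_true, List.contains_iff_exists_mem_beq]
    constructor
    · rintro ⟨w, hw, hend⟩
      rcases (pv_endswith_under u w (hW w hw)).1 hend with ⟨-, htw⟩
      exact ⟨w, hw, by simp [htw]⟩
    · rintro ⟨w, hw, hbeq⟩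
      have htw : (u.reverse.takeWhile (fun c => c != '_')).reverse = w := by
        simpa using hbeq
      exact ⟨w, hw, (pv_endswith_under u w (hW w hw)).2 ⟨by simp [hsh], htw⟩⟩

-- ===== VERDICT (by name: the statement is the Claim_ definition above) =====
theorem is_reference_table_name_py_spec : Claim_equal_is_reference_table_name_py := by
  intro t _
  unfold Spec_is_reference_table_name_py is_reference_table_name_py is_reference_table_name_py_alt
  simp only [PySem.Str.endswith_eq]
  have hmap : pvSuffixes.any
      (fun s => PySem.Chars.endswith (PySem.Str.upper t).toList s.toList) =
      pvSuffixWords.any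
      (fun w => PySem.Chars.endswith (PySem.Str.upper t).toList ('_' :: w)) := by
    rfl
  rw [hmap, pv_gen _ pvSuffixWords (by decide)]
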